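-- pv_equiv track=rewrite | github.com/Speed-Jobs/backend-model | app/services/dashboard/recruitment_schedule.py | get_dates_from_json_for_prediction
-- ===== SOURCE A (Python) =====
-- def get_dates_from_json_for_prediction(date_json: list) -> tuple:
--     """JSON 배열에서 시작/종료 날짜 추출 (예측용)"""
--     if not date_json:
--         return None, None
--
--     dates = []
--     for date_range in date_json:
--         if date_range and date_range[0]:
--             dates.append(date_range[0])
--         if date_range and len(date_range) > 1 and date_range[1]:
--             dates.append(date_range[1])
--
--     if not dates:
--         return None, None
--
--     return min(dates), max(dates)
-- ===== SOURCE B (Python) =====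
-- def get_dates_from_json_for_prediction(date_json: list) -> tuple:
--     """JSON 배열에서 시작/종료 날짜 추출 (예측용)"""
--     if not date_json:
--         return None, None
--
--     lo = None
--     hi = None
--     for date_range in date_json:
--         if date_range and date_range[0]:
--             lo, hi = _upd(lo, hi, date_range[0])
--         if date_range and len(date_range) > 1 and date_range[1]:
--             lo, hi = _upd(lo, hi, date_range[1])
--     return lo, hi
--
--
-- def _upd(lo, hi, v):
--     if lo is None or v < lo:
--         lo = v
--     if hi is None or v > hi:
--         hi = v
--     return lo, hi
-- ===== Notes on version B (the rewrite author's own statement) =====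
-- stated objective: simpler
-- what changed: Replaces the intermediate dates list plus min()/max() passes by a single streaming pass that maintains two running accumulators lo/hi.
import Mathlib
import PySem

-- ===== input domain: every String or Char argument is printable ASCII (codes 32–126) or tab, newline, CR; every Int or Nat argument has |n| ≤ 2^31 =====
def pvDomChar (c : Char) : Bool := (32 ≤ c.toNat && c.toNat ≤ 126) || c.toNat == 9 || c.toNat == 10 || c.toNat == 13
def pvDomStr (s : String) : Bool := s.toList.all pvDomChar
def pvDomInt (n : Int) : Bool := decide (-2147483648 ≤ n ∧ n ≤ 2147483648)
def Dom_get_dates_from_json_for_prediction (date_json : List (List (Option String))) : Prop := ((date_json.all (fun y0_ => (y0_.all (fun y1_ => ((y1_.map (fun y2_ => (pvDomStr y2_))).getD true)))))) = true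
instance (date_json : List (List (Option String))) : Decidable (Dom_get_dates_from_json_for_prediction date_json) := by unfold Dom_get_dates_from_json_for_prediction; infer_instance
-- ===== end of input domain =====

-- B replaces A's intermediate list + min()/max() passes by one streaming pass with lo/hi accumulators (same O(n), simpler space).


-- Python truthiness of an Option String cell: None and "" are falsy
def pvTruthy (o : Option String) : Bool :=
  match o with
  | none => false
  | some s => s ≠ ""

-- ===== PORT A =====
def get_dates_from_json_for_prediction (date_json : List (List (Option String))) : Option String × Option String :=
  if date_json = [] then (none, none)
  else
    let dates := date_json.foldl (fun acc date_range =>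
      let acc := if date_range ≠ [] && pvTruthy (date_range.headD none) then
          acc ++ [(date_range.headD none).getD ""] else acc
      if date_range ≠ [] && decide (1 < date_range.length) && pvTruthy (date_range.getD 1 none) then
          acc ++ [(date_range.getD 1 none).getD ""] else acc) []
    if dates = [] then (none, none)
    else (PySem.List.min? dates (fun x => x), PySem.List.max? dates (fun x => x))

-- ===== PORT B =====
-- B's helper _upd(lo, hi, v)
def pvUpd (lo hi : Option String) (v : String) : Option String × Option String :=
  let lo := match lo with
    | none => some v
    | some l => if v < l then some v else some l
  let hi := match hi with
    | none => some v
    | some h => if h < v then some v else some h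
  (lo, hi)

def get_dates_from_json_for_prediction_alt (date_json : List (List (Option String))) : Option String × Option String :=
  if date_json = [] then (none, none)
  else
    date_json.foldl (fun acc date_range =>
      let acc := if date_range ≠ [] && pvTruthy (date_range.headD none) then
          pvUpd acc.1 acc.2 ((date_range.headD none).getD "") else acc
      if date_range ≠ [] && decide (1 < date_range.length) && pvTruthy (date_range.getD 1 none) then
          pvUpd acc.1 acc.2 ((date_range.getD 1 none).getD "") else acc)
      ((none : Option String), (none : Option String))

-- ===== PRECONDITION & SPEC =====
def Spec_get_dates_from_json_for_prediction (date_json : List (List (Option String))) (out : Option String × Option String) : Prop := out = get_dates_from_json_for_prediction_alt date_json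
instance (date_json : List (List (Option String))) (out : Option String × Option String) : Decidable (Spec_get_dates_from_json_for_prediction date_json out) := by unfold Spec_get_dates_from_json_for_prediction; infer_instance

-- ===== CLAIM (what is proved, stated in full; the proofs are below) =====
def Claim_equal_get_dates_from_json_for_prediction : Prop := ∀ (date_json : List (List (Option String))), Dom_get_dates_from_json_for_prediction date_json → Spec_get_dates_from_json_for_prediction date_json (get_dates_from_json_for_prediction date_json)

-- ===== LEMMAS AND PROOFS =====

-- the values a single date_range contributes, in order
def pvPick (date_range : List (Option String)) : List String :=
  (if date_range ≠ [] && pvTruthy (date_range.headD none) then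
      [(date_range.headD none).getD ""] else [])
  ++ (if date_range ≠ [] && decide (1 < date_range.length) && pvTruthy (date_range.getD 1 none) then
      [(date_range.getD 1 none).getD ""] else [])

theorem stepA_eq (acc : List String) (dr : List (Option String)) :
    (let acc := if dr ≠ [] && pvTruthy (dr.headD none) then acc ++ [(dr.headD none).getD ""] else acc
     if dr ≠ [] && decide (1 < dr.length) && pvTruthy (dr.getD 1 none) then
        acc ++ [(dr.getD 1 none).getD ""] else acc) = acc ++ pvPick dr := by
  simp only [pvPick]
  split_ifs <;> simp

theorem stepB_eq (acc : Option String × Option String) (dr : List (Option String)) :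
    (let acc := if dr ≠ [] && pvTruthy (dr.headD none) then
        pvUpd acc.1 acc.2 ((dr.headD none).getD "") else acc
     if dr ≠ [] && decide (1 < dr.length) && pvTruthy (dr.getD 1 none) then
        pvUpd acc.1 acc.2 ((dr.getD 1 none).getD "") else acc)
      = (pvPick dr).foldl (fun a v => pvUpd a.1 a.2 v) acc := by
  simp only [pvPick]
  split_ifs <;> simp [List.foldl]

theorem foldlA_flat (l : List (List (Option String))) (acc : List String) :
    l.foldl (fun acc date_range =>
      let acc := if date_range ≠ [] && pvTruthy (date_range.headD none) then
          acc ++ [(date_range.headD none).getD ""] else acc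
      if date_range ≠ [] && decide (1 < date_range.length) && pvTruthy (date_range.getD 1 none) then
          acc ++ [(date_range.getD 1 none).getD ""] else acc) acc
    = acc ++ l.flatMap pvPick := by
  induction l generalizing acc with
  | nil => simp
  | cons dr t ih => simp only [List.foldl, List.flatMap_cons]; rw [stepA_eq, ih, List.append_assoc]

theorem foldlB_flat (l : List (List (Option String))) (acc : Option String × Option String) :
    l.foldl (fun acc date_range =>
      let acc := if date_range ≠ [] && pvTruthy (date_range.headD none) then
          pvUpd acc.1 acc.2 ((date_range.headD none).getD "") else acc
      if date_range ≠ [] && decide (1 < date_range.length) && pvTruthy (date_range.getD 1 none) then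
          pvUpd acc.1 acc.2 ((date_range.getD 1 none).getD "") else acc) acc
    = (l.flatMap pvPick).foldl (fun a v => pvUpd a.1 a.2 v) acc := by
  induction l generalizing acc with
  | nil => simp
  | cons dr t ih =>
      simp only [List.foldl, List.flatMap_cons]
      rw [stepB_eq, ih, List.foldl_append]

-- streaming fold over a list, started at (some a, some b), computes running min/max
theorem foldl_upd_some (l : List String) (a b : String) :
    l.foldl (fun acc v => pvUpd acc.1 acc.2 v) (some a, some b)
      = (some (l.foldl min a), some (l.foldl max b)) := by
  induction l generalizing a b with
  | nil => rfl
  | cons x t ih =>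
      simp only [List.foldl]
      rw [show pvUpd (some a) (some b) x = (some (min a x), some (max b x)) from ?_, ih]
      simp only [pvUpd]
      rcases lt_or_ge x a with h | h <;> rcases lt_or_ge b x with h2 | h2
      · rw [if_pos h, if_pos h2, min_eq_right h.le, max_eq_right h2.le]
      · rw [if_pos h, if_neg (not_lt.mpr h2), min_eq_right h.le, max_eq_left h2]
      · rw [if_neg (not_lt.mpr h), if_pos h2, min_eq_left h, max_eq_right h2.le]
      · rw [if_neg (not_lt.mpr h), if_neg (not_lt.mpr h2), min_eq_left h, max_eq_left h2]

theorem foldl_upd_none (l : List String) :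
    l.foldl (fun acc v => pvUpd acc.1 acc.2 v) (none, none)
      = match l with
        | [] => (none, none)
        | x :: t => (some (t.foldl min x), some (t.foldl max x)) := by
  cases l with
  | nil => rfl
  | cons x t =>
      simp only [List.foldl]
      rw [show pvUpd none none x = (some x, some x) from rfl, foldl_upd_some]

-- ===== VERDICT (by name: the statement is the Claim_ definition above) =====
theorem get_dates_from_json_for_prediction_spec : Claim_equal_get_dates_from_json_for_prediction := by
  intro date_json _
  show get_dates_from_json_for_prediction date_json = get_dates_from_json_for_prediction_alt date_json
  unfold get_dates_from_json_for_prediction get_dates_from_json_for_prediction_alt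
  split_ifs with h
  · rfl
  · rw [foldlA_flat, foldlB_flat, foldl_upd_none]
    simp only [List.nil_append]
    cases hl : date_json.flatMap pvPick with
    | nil => simp
    | cons x t =>
        simp [PySem.List.min?_id_cons, PySem.List.max?_id_cons]
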